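-- pv_equiv track=rewrite | github.com/levlai/chiralipy | chiralipy/transform/aromaticity.py | apply_huckel
-- ===== SOURCE A (Python) =====
-- from enum import IntEnum
--
-- class ElectronDonorType(IntEnum):
--     """Electron donor type for aromaticity classification.
--
--     Each atom in a potential aromatic ring is classified by how many
--     electrons it can donate to the π system.
--     """
--     VACANT = 0      # 0 electrons (empty p orbital)
--     ONE = 1         # contributes 1 electron
--     TWO = 2         # contributes 2 electrons
--     ONE_OR_TWO = 3  # ambiguous 1 or 2
--     ANY = 4         # can be any (dummy atom)
--     NONE = 5        # cannot participate
--
-- def _get_min_max_elec(dtype: ElectronDonorType) -> tuple[int, int]: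
--     """Get min and max electrons for donor type.
--
--     Args:
--         dtype: Electron donor type.
--
--     Returns:
--         Tuple of (min_elec, max_elec).
--     """
--     if dtype == ElectronDonorType.ANY:
--         return 1, 2
--     elif dtype == ElectronDonorType.ONE_OR_TWO:
--         return 1, 2
--     elif dtype == ElectronDonorType.ONE:
--         return 1, 1
--     elif dtype == ElectronDonorType.TWO:
--         return 2, 2
--     else:  # VACANT or NONE
--         return 0, 0
--
-- def apply_huckel(
--     ring_atoms: list[int],
--     edon: dict[int, ElectronDonorType],
--     min_ring_size: int = 0,
-- ) -> bool:
--     """Apply Hückel rule to a ring.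
--
--     Hückel rule: (4n + 2) pi electrons for aromaticity.
--     Special: at most 1 AnyElectronDonorType atom per ring.
--
--     Args:
--         ring_atoms: List of atom indices in the ring.
--         edon: Dict mapping atom index to donor type.
--         min_ring_size: Minimum ring size (0 = no limit).
--
--     Returns:
--         True if ring satisfies Hückel.
--     """
--     if min_ring_size and len(ring_atoms) < min_ring_size:
--         return False
--
--     rlw = 0  # Ring lower bound
--     rup = 0  # Ring upper bound
--     n_any = 0
--
--     for idx in ring_atoms:
--         dtype = edon.get(idx, ElectronDonorType.NONE)
--         if dtype == ElectronDonorType.ANY: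
--             n_any += 1
--             if n_any > 1:
--                 return False
--         atlw, atup = _get_min_max_elec(dtype)
--         rlw += atlw
--         rup += atup
--
--     # Check Hückel: (4n + 2) = 2, 6, 10, 14, ...
--     if rup >= 6:
--         for rie in range(rlw, rup + 1):
--             if (rie - 2) % 4 == 0:
--                 return True
--     elif rup == 2:
--         return True
--
--     return False
-- ===== SOURCE B (Python) =====
-- _MIN = {4: 1, 3: 1, 1: 1, 2: 2}
-- _MAX = {4: 2, 3: 2, 1: 1, 2: 2}
--
-- def apply_huckel(ring_atoms, edon, min_ring_size=0):
--     if min_ring_size and len(ring_atoms) < min_ring_size: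
--         return False
--     dtypes = [edon.get(i, 5) for i in ring_atoms]
--     if dtypes.count(4) > 1:
--         return False
--     rlw = sum(_MIN.get(d, 0) for d in dtypes)
--     rup = sum(_MAX.get(d, 0) for d in dtypes)
--     if rup >= 6:
--         m = rup - 2
--         return m - m % 4 >= rlw - 2
--     return rup == 2
-- ===== Notes on version B (the rewrite author's own statement) =====
-- stated objective: simpler
-- what changed: B replaces A's single accumulator loop with early return by a list of looked-up donor types, a count of ANY atoms and two table-driven sums, and replaces A's linear search over range(rlw, rup+1) for a (4n+2) electron count by a closed-form test that a multiple of 4 lies in [rlw-2, rup-2].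
import Mathlib
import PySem

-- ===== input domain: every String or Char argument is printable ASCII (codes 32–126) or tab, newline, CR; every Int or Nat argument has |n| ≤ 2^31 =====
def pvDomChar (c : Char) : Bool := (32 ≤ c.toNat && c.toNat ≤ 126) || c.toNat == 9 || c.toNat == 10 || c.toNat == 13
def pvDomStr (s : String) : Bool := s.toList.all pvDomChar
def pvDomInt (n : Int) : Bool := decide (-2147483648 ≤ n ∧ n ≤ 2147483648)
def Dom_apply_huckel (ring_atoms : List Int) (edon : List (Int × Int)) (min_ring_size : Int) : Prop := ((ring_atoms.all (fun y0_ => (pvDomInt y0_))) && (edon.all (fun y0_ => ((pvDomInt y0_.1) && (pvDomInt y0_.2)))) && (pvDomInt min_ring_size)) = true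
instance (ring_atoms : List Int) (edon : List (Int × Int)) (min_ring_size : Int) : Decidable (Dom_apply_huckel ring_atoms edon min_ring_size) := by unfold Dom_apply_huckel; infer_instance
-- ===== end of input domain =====

-- B replaces A's accumulator loop with early return by a count + two comprehension sums, and A's
-- bounded search over range(rlw, rup+1) by a closed-form test (objective: simpler).

-- ===== PORT A =====
-- _get_min_max_elec (dtype values are plain ints of the IntEnum)
def pvGetMinMax (dtype : Int) : Int × Int :=
  if dtype == 4 then (1, 2)
  else if dtype == 3 then (1, 2)
  else if dtype == 1 then (1, 1)
  else if dtype == 2 then (2, 2)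
  else (0, 0)

-- the trailing Hückel check of A (after the accumulation loop)
def pvCheckA (rlw rup : Int) : Bool :=
  if rup ≥ 6 then
    (PySem.List.pyRange rlw (rup + 1) 1).any (fun rie => PySem.Int.mod (rie - 2) 4 == 0)
  else if rup == 2 then true
  else false

-- A's for-loop over ring_atoms with state (rlw, rup, n_any) and its early `return False`
def pvLoopA (d : PySem.Dict Int Int) : List Int → Int → Int → Int → Bool
  | [], rlw, rup, _ => pvCheckA rlw rup
  | idx :: rest, rlw, rup, n_any =>
    let dtype := PySem.Dict.getD d idx 5
    if dtype == 4 then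
      if n_any + 1 > 1 then false
      else
        let mm := pvGetMinMax dtype
        pvLoopA d rest (rlw + mm.1) (rup + mm.2) (n_any + 1)
    else
      let mm := pvGetMinMax dtype
      pvLoopA d rest (rlw + mm.1) (rup + mm.2) n_any

def apply_huckel (ring_atoms : List Int) (edon : List (Int × Int)) (min_ring_size : Int) : Bool :=
  if min_ring_size != 0 && decide ((ring_atoms.length : Int) < min_ring_size) then false
  else pvLoopA (PySem.Dict.ofList edon) ring_atoms 0 0 0

-- ===== PORT B =====
def pvMinTbl : PySem.Dict Int Int := PySem.Dict.ofList [(4, 1), (3, 1), (1, 1), (2, 2)]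
def pvMaxTbl : PySem.Dict Int Int := PySem.Dict.ofList [(4, 2), (3, 2), (1, 1), (2, 2)]

def apply_huckel_alt (ring_atoms : List Int) (edon : List (Int × Int)) (min_ring_size : Int) : Bool :=
  if min_ring_size != 0 && decide ((ring_atoms.length : Int) < min_ring_size) then false
  else
    let d := PySem.Dict.ofList edon
    let dtypes := ring_atoms.map (fun i => PySem.Dict.getD d i 5)
    if PySem.List.count dtypes 4 > 1 then false
    else
      let rlw := (dtypes.map (fun t => PySem.Dict.getD pvMinTbl t 0)).sum
      let rup := (dtypes.map (fun t => PySem.Dict.getD pvMaxTbl t 0)).sum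
      if rup ≥ 6 then
        let m := rup - 2
        decide (m - PySem.Int.mod m 4 ≥ rlw - 2)
      else rup == 2

-- ===== PRECONDITION & SPEC =====
def Spec_apply_huckel (ring_atoms : List Int) (edon : List (Int × Int)) (min_ring_size : Int) (out : Bool) : Prop := out = apply_huckel_alt ring_atoms edon min_ring_size
instance (ring_atoms : List Int) (edon : List (Int × Int)) (min_ring_size : Int) (out : Bool) : Decidable (Spec_apply_huckel ring_atoms edon min_ring_size out) := by unfold Spec_apply_huckel; infer_instance

-- ===== CLAIM (what is proved, stated in full; the proofs are below) =====
def Claim_equal_apply_huckel : Prop := ∀ (ring_atoms : List Int) (edon : List (Int × Int)) (min_ring_size : Int), Dom_apply_huckel ring_atoms edon min_ring_size → Spec_apply_huckel ring_atoms edon min_ring_size (apply_huckel ring_atoms edon min_ring_size)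

-- ===== LEMMAS AND PROOFS =====

-- the table lookups of B compute _get_min_max_elec's components
lemma pvMinTbl_getD (t : Int) : PySem.Dict.getD pvMinTbl t 0 = (pvGetMinMax t).1 := by
  rcases eq_or_ne t 4 with rfl | h4
  · decide
  rcases eq_or_ne t 3 with rfl | h3
  · decide
  rcases eq_or_ne t 1 with rfl | h1
  · decide
  rcases eq_or_ne t 2 with rfl | h2
  · decide
  have hm : pvMinTbl = PySem.Dict.mk [(4, 1), (3, 1), (1, 1), (2, 2)] := by decide
  simp [hm, pvGetMinMax, PySem.Dict.getD, PySem.Dict.get?,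
        Ne.symm h4, Ne.symm h3, Ne.symm h1, Ne.symm h2, h4, h3, h1, h2]

lemma pvMaxTbl_getD (t : Int) : PySem.Dict.getD pvMaxTbl t 0 = (pvGetMinMax t).2 := by
  rcases eq_or_ne t 4 with rfl | h4
  · decide
  rcases eq_or_ne t 3 with rfl | h3
  · decide
  rcases eq_or_ne t 1 with rfl | h1
  · decide
  rcases eq_or_ne t 2 with rfl | h2
  · decide
  have hm : pvMaxTbl = PySem.Dict.mk [(4, 2), (3, 2), (1, 1), (2, 2)] := by decide
  simp [hm, pvGetMinMax, PySem.Dict.getD, PySem.Dict.get?,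
        Ne.symm h4, Ne.symm h3, Ne.symm h1, Ne.symm h2, h4, h3, h1, h2]

-- A's search over range(rlw, rup+1) equals B's closed-form test
lemma pvCheckA_closed (rlw rup : Int) (h : rup ≥ 6) :
    pvCheckA rlw rup = decide (rup - 2 - PySem.Int.mod (rup - 2) 4 ≥ rlw - 2) := by
  have hm : PySem.Int.mod (rup - 2) 4 = (rup - 2) % 4 :=
    PySem.Int.mod_eq_emod_of_pos (by norm_num)
  simp only [pvCheckA, if_pos h, hm]
  rcases Decidable.em (rup - 2 - (rup - 2) % 4 ≥ rlw - 2) with hc | hc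
  · rw [decide_eq_true hc]
    have hmod : (rup - 2) % 4 = 0 ∨ (rup - 2) % 4 = 1 ∨ (rup - 2) % 4 = 2 ∨ (rup - 2) % 4 = 3 := by omega
    refine List.any_eq_true.mpr ⟨rup - 2 - (rup - 2) % 4 + 2, ?_, ?_⟩
    · rw [PySem.List.mem_pyRange_one]; omega
    · show (PySem.Int.mod (rup - 2 - (rup - 2) % 4 + 2 - 2) 4 == 0) = true
      simp only [beq_iff_eq, PySem.Int.mod_eq_zero_iff_dvd]
      omega
  · rw [decide_eq_false hc]
    apply List.any_eq_false.mpr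
    intro x hx
    rw [PySem.List.mem_pyRange_one] at hx
    show ¬ (PySem.Int.mod (x - 2) 4 == 0) = true
    simp only [beq_iff_eq, PySem.Int.mod_eq_zero_iff_dvd]
    intro h0
    obtain ⟨k, hk⟩ := h0
    omega

-- B's trailing check written over pvCheckA
lemma pvCheckB_eq (rlw rup : Int) :
    (if rup ≥ 6 then decide (rup - 2 - PySem.Int.mod (rup - 2) 4 ≥ rlw - 2)
     else (rup == 2 : Bool)) = pvCheckA rlw rup := by
  by_cases h : rup ≥ 6
  · rw [if_pos h, pvCheckA_closed rlw rup h]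
  · simp only [pvCheckA, if_neg h]
    by_cases h2 : rup = 2 <;> simp [h2]

-- the loop of A equals B's count-then-sum decomposition
lemma pvLoopA_eq (d : PySem.Dict Int Int) (l : List Int) :
    ∀ rlw rup n_any : Int, (n_any = 0 ∨ n_any = 1) →
    pvLoopA d l rlw rup n_any =
      if ((PySem.List.count (l.map (fun i => PySem.Dict.getD d i 5)) 4 : Int) + n_any > 1) then false
      else pvCheckA (rlw + ((l.map (fun i => PySem.Dict.getD d i 5)).map (fun t => (pvGetMinMax t).1)).sum)
                    (rup + ((l.map (fun i => PySem.Dict.getD d i 5)).map (fun t => (pvGetMinMax t).2)).sum) := by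
  induction l with
  | nil =>
    intro rlw rup n_any hn
    simp only [List.map_nil, List.sum_nil, add_zero, pvLoopA]
    rw [if_neg (by simp [PySem.List.count_eq]; omega)]
  | cons i rest ih =>
    intro rlw rup n_any hn
    simp only [pvLoopA, List.map_cons]
    by_cases h4 : PySem.Dict.getD d i 5 = 4
    · rw [if_pos (by simp [h4])]
      rcases hn with h0 | h1
      · rw [if_neg (by omega), ih _ _ _ (Or.inr (by omega)), h0]
        have hc : PySem.List.count ((4 : Int) :: rest.map (fun i => PySem.Dict.getD d i 5)) 4
            = PySem.List.count (rest.map (fun i => PySem.Dict.getD d i 5)) 4 + 1 := by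
          simp [PySem.List.count_eq]
        rw [h4, hc]
        have hmm : pvGetMinMax 4 = (1, 2) := by decide
        push_cast
        split_ifs with c1 c2 <;> try omega
        · rfl
        · simp only [List.sum_cons, hmm]
          congr 1 <;> omega
      · rw [if_pos (by omega), h1, h4]
        have hc : PySem.List.count ((4 : Int) :: rest.map (fun i => PySem.Dict.getD d i 5)) 4
            = PySem.List.count (rest.map (fun i => PySem.Dict.getD d i 5)) 4 + 1 := by
          simp [PySem.List.count_eq]
        rw [hc]
        rw [if_pos (by omega)]
    · rw [if_neg (by simp [h4])]
      rw [ih _ _ _ hn]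
      have hc : PySem.List.count (PySem.Dict.getD d i 5 :: rest.map (fun i => PySem.Dict.getD d i 5)) 4
          = PySem.List.count (rest.map (fun i => PySem.Dict.getD d i 5)) 4 := by
        simp [PySem.List.count_eq, h4]
      rw [hc]
      split_ifs with c1 <;> try rfl
      simp only [List.sum_cons]
      congr 1 <;> omega

-- ===== VERDICT (by name: the statement is the Claim_ definition above) =====
theorem apply_huckel_spec : Claim_equal_apply_huckel := by
  intro ring_atoms edon min_ring_size _
  unfold Spec_apply_huckel apply_huckel apply_huckel_alt
  by_cases hg : (min_ring_size != 0 && decide ((ring_atoms.length : Int) < min_ring_size)) = true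
  · rw [if_pos hg, if_pos hg]
  · rw [if_neg hg, if_neg hg]
    simp only [pvMinTbl_getD, pvMaxTbl_getD, List.map_map, Function.comp_def]
    rw [pvLoopA_eq _ _ 0 0 0 (Or.inl rfl)]
    simp only [add_zero, zero_add, List.map_map, Function.comp_def]
    by_cases hc : PySem.List.count (ring_atoms.map (fun i => PySem.Dict.getD (PySem.Dict.ofList edon) i 5)) 4 > 1
    · rw [if_pos (by omega), if_pos hc]
    · rw [if_neg (by omega), if_neg hc]
      exact (pvCheckB_eq _ _).symm
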